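-- pv_equiv track=rewrite | github.com/karelplanken/fcc-coding-challenges | challenges/207_smallest_gap.py | smallest_gap
-- ===== SOURCE A (Python) =====
-- def smallest_gap(s: str) -> str:
--     min_gap = None
--
--     for i, char in enumerate(s):
--         j = s.find(char, i + 1)
--         if j != -1:
--             gap = s[i + 1 : j]
--             if min_gap is None or len(gap) < len(min_gap):
--                 min_gap = gap
--
--     return min_gap or ''
-- ===== SOURCE B (Python) =====
-- def smallest_gap(s: str) -> str:
--     last = {}
--     best = None  # (i, j) pair of consecutive equal chars with smallest gap
--     for j, char in enumerate(s):
--         i = last.get(char)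
--         if i is not None:
--             if best is None or j - i - 1 < best[1] - best[0] - 1:
--                 best = (i, j)
--         last[char] = j
--     return s[best[0] + 1 : best[1]] if best is not None else ''
-- ===== Notes on version B (the rewrite author's own statement) =====
-- stated objective: faster
-- what changed: Replaces A's per-position forward scan with s.find (O(n^2) worst case) by a single left-to-right pass that keeps each character's previous index in a dict and tracks the best consecutive-equal pair.
import Mathlib
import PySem

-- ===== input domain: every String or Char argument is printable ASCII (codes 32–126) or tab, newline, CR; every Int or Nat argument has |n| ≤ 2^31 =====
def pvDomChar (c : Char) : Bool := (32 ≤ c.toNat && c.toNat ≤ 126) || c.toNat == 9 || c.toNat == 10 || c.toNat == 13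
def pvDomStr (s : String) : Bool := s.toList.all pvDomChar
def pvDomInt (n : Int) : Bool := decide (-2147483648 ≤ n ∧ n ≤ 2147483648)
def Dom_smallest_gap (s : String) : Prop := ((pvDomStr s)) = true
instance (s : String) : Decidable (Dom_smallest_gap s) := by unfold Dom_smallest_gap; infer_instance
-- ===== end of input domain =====

-- B replaces A's per-position forward scan (s.find) by a single pass that remembers each
-- character's previous index in a dict; same return value, O(n) instead of O(n^2).

-- ===== PORT A =====
def smallest_gap (s : String) : String :=
  let cs := s.toList
  let min_gap : Option (List Char) :=
    (PySem.List.enumerate cs 0).foldl (fun min_gap ic =>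
      let j := PySem.Chars.findFrom cs [ic.2] (ic.1 + 1) none
      if j ≠ -1 then
        let gap := PySem.Chars.slice cs (some (ic.1 + 1)) (some j)
        match min_gap with
        | none => some gap
        | some g => if gap.length < g.length then some gap else min_gap
      else min_gap) none
  match min_gap with
  | none => ""
  | some g => String.ofList g

-- ===== PORT B =====
def smallest_gap_alt (s : String) : String :=
  let cs := s.toList
  let st :=
    (PySem.List.enumerate cs 0).foldl (fun st jc =>
      let best :=
        match st.1.get? jc.2 with
        | some i =>
          match st.2 with
          | none => some (i, jc.1)
          | some b => if jc.1 - i - 1 < b.2 - b.1 - 1 then some (i, jc.1) else st.2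
        | none => st.2
      (st.1.insert jc.2 jc.1, best))
      ((PySem.Dict.empty : PySem.Dict Char Int), (none : Option (Int × Int)))
  match st.2 with
  | none => ""
  | some b => String.ofList (PySem.Chars.slice cs (some (b.1 + 1)) (some b.2))

-- ===== PRECONDITION & SPEC =====
def Spec_smallest_gap (s : String) (out : String) : Prop := out = smallest_gap_alt s
instance (s : String) (out : String) : Decidable (Spec_smallest_gap s out) := by unfold Spec_smallest_gap; infer_instance

-- ===== CLAIM (what is proved, stated in full; the proofs are below) =====
def Claim_equal_smallest_gap : Prop := ∀ (s : String), Dom_smallest_gap s → Spec_smallest_gap s (smallest_gap s)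

-- ===== LEMMAS AND PROOFS =====
def pvVal (p : Int × Int) : Int := p.2 - p.1 - 1
def pvRefMin : List (Int × Int) → Option (Int × Int)
  | [] => none
  | p :: t =>
    match pvRefMin t with
    | none => some p
    | some q => if pvVal p ≤ pvVal q then some p else some q
def pvChamp (b : Option (Int × Int)) (p : Int × Int) : Option (Int × Int) :=
  match b with
  | none => some p
  | some q => if pvVal p < pvVal q then some p else some q
theorem pvFold_champ (l : List (Int × Int)) (b : Option (Int × Int)) :
    l.foldl pvChamp b
    = match b with
      | none => pvRefMin l
      | some q =>
        match pvRefMin l with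
        | none => some q
        | some m => if pvVal m < pvVal q then some m else some q := by
  induction l generalizing b with
  | nil => cases b <;> rfl
  | cons p t ih =>
    simp only [List.foldl_cons, ih, pvRefMin, pvChamp]
    cases b with
    | none =>
      cases ht : pvRefMin t with
      | none => simp
      | some m =>
        simp only []
        split_ifs with h1 h2 <;> try rfl
        · omega
        · omega
    | some q =>
      cases ht : pvRefMin t with
      | none =>
        simp only []
        split_ifs <;> rfl
      | some m =>
        simp only []
        by_cases h1 : pvVal p < pvVal q <;> by_cases h2 : pvVal p ≤ pvVal m <;>
          by_cases h3 : pvVal m < pvVal q <;> by_cases h4 : pvVal m < pvVal p <;>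
          simp [h1, h2, h3, h4] <;> omega
def pvLastIdx? : List Char → Char → Option Nat
  | [], _ => none
  | a :: t, c =>
    match pvLastIdx? t c with
    | some k => some (k + 1)
    | none => if a = c then some 0 else none

theorem pvRefMin_eq_none_iff (l : List (Int × Int)) : pvRefMin l = none ↔ l = [] := by
  cases l with
  | nil => simp [pvRefMin]
  | cons p t => simp only [pvRefMin]; cases pvRefMin t <;> simp; split_ifs <;> simp

theorem pvLastIdx?_eq_none_iff (l : List Char) (c : Char) :
    pvLastIdx? l c = none ↔ c ∉ l := by
  induction l with
  | nil => simp [pvLastIdx?]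
  | cons a t ih =>
    simp only [pvLastIdx?]
    cases h : pvLastIdx? t c with
    | some k => simp [h] at ih; simp [ih]
    | none =>
      simp [h] at ih
      split_ifs with hac
      · simp [hac]
      · simp [ih]; exact fun hca => hac hca.symm

theorem pvLastIdx?_append_singleton (l : List Char) (x c : Char) :
    pvLastIdx? (l ++ [x]) c = if x = c then some l.length else pvLastIdx? l c := by
  induction l with
  | nil => simp [pvLastIdx?]
  | cons a t ih =>
    simp only [List.cons_append, pvLastIdx?, ih]
    by_cases hxc : x = c
    · simp [hxc]
    · simp only [hxc, if_false]

theorem pvLastIdx?_eq_some_iff (l : List Char) (c : Char) (i : Nat) :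
    pvLastIdx? l c = some i ↔
      i < l.length ∧ l.getD i 'a' = c ∧ ∀ k, i < k → k < l.length → l.getD k 'a' ≠ c := by
  induction l generalizing i with
  | nil => simp [pvLastIdx?]
  | cons a t ih =>
    simp only [pvLastIdx?]
    cases h : pvLastIdx? t c with
    | some k =>
      have hk := (ih k).mp h
      constructor
      · rintro hik
        simp at hik
        subst hik
        refine ⟨by simpa using Nat.succ_lt_succ hk.1, by simpa using hk.2.1, ?_⟩
        intro m h1 h2
        match m, h1 with
        | (m' + 1), h1 =>
          simpa using hk.2.2 m' (by omega) (by simpa using h2)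
      · rintro ⟨h1, h2, h3⟩
        match i with
        | 0 =>
          exfalso
          exact h3 (k + 1) (by omega) (by simpa using Nat.succ_lt_succ hk.1) (by simpa using hk.2.1)
        | (i' + 1) =>
          have : pvLastIdx? t c = some i' := by
            apply (ih i').mpr
            exact ⟨by simpa using h1, by simpa using h2, fun m hm1 hm2 => by
              simpa using h3 (m + 1) (by omega) (by simpa using Nat.succ_lt_succ hm2)⟩
          simp [h] at this
          simp [this]
    | none =>
      have hnot : c ∉ t := (pvLastIdx?_eq_none_iff t c).mp h
      split_ifs with hac
      · constructor
        · rintro hi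
          simp at hi
          subst hi
          refine ⟨by simp, by simpa using hac, ?_⟩
          intro m h1 h2
          match m, h1 with
          | (m' + 1), _ =>
            intro hm
            apply hnot
            have hm' : m' < t.length := by simpa using h2
            have hgd : t.getD m' 'a' = c := by simpa [hac] using hm
            rw [← hgd, List.getD_eq_getElem t 'a' hm']
            exact List.getElem_mem hm'
        · rintro ⟨h1, h2, h3⟩
          match i with
          | 0 => rfl
          | (i' + 1) =>
            exfalso
            have hi' : i' < t.length := by simpa using h1
            have : t.getD i' 'a' = c := by simpa using h2
            apply hnot
            rw [← this, List.getD_eq_getElem t 'a' hi']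
            exact List.getElem_mem hi'
      · constructor
        · rintro ⟨⟩
        · rintro ⟨h1, h2, h3⟩
          exfalso
          match i with
          | 0 => exact hac (by simpa using h2)
          | (i' + 1) =>
            have hi' : i' < t.length := by simpa using h1
            have : t.getD i' 'a' = c := by simpa using h2
            apply hnot
            rw [← this, List.getD_eq_getElem t 'a' hi']
            exact List.getElem_mem hi'
theorem pvRefMin_eq_some_iff (l : List (Int × Int)) (m : Int × Int)
    (hpw : l.Pairwise (fun p q => pvVal p = pvVal q → p.1 < q.1)) :
    pvRefMin l = some m ↔
      m ∈ l ∧ ∀ p ∈ l, pvVal m < pvVal p ∨ (pvVal m = pvVal p ∧ m.1 ≤ p.1) := by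
  induction l generalizing m with
  | nil => simp [pvRefMin]
  | cons p t ih =>
    rw [List.pairwise_cons] at hpw
    obtain ⟨hp, hpw'⟩ := hpw
    simp only [pvRefMin]
    cases ht : pvRefMin t with
    | none =>
      have ht' : t = [] := (pvRefMin_eq_none_iff t).mp ht
      subst ht'
      simp only [List.mem_singleton, List.mem_cons]
      constructor
      · rintro h
        simp at h
        subst h
        exact ⟨Or.inl rfl, by intro q hq; simp at hq; subst hq; right; exact ⟨rfl, le_refl _⟩⟩
      · rintro ⟨h1, h2⟩
        rcases h1 with rfl | h1
        · rfl
        · simp at h1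
    | some q =>
      have hq := (ih q hpw').mp ht
      constructor
      · intro h
        change (if pvVal p ≤ pvVal q then some p else some q) = some m at h
        split_ifs at h with hpq
        · -- m = p
          simp at h; subst h
          refine ⟨List.mem_cons_self .., ?_⟩
          intro r hr'
          rcases List.mem_cons.mp hr' with rfl | hr
          · right; exact ⟨rfl, le_refl _⟩
          · rcases hq.2 r hr with h' | ⟨h1', h2'⟩
            · by_cases he : pvVal p = pvVal r
              · right; exact ⟨he, le_of_lt (hp r hr he)⟩
              · left; omega
            · by_cases he : pvVal p = pvVal r
              · right; exact ⟨he, le_of_lt (hp r hr he)⟩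
              · left; omega
        · -- m = q
          simp at h; subst h
          refine ⟨List.mem_cons_of_mem _ hq.1, ?_⟩
          intro r hr'
          rcases List.mem_cons.mp hr' with rfl | hr
          · left; omega
          · exact hq.2 r hr
      · rintro ⟨h1, h2⟩
        change (if pvVal p ≤ pvVal q then some p else some q) = some m
        rcases List.mem_cons.mp h1 with rfl | h1'
        · -- m = p; show the if takes the p branch
          have hle : pvVal m ≤ pvVal q := by
            rcases h2 q (List.mem_cons_of_mem _ hq.1) with h' | ⟨h', _⟩ <;> omega
          simp [hle]
        · -- m ∈ t
          have hmq : m = q := by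
            have hqm := hq.2 m h1'
            have hmq' := h2 q (List.mem_cons_of_mem _ hq.1)
            have hv : pvVal q = pvVal m ∧ q.1 = m.1 := by
              rcases hqm with h' | ⟨h1'', h2''⟩ <;> rcases hmq' with h'' | ⟨h3', h4'⟩ <;>
                constructor <;> omega
            have h2eq : m.2 = q.2 := by
              have := hv.1; unfold pvVal at this; omega
            exact Prod.ext_iff.mpr ⟨hv.2.symm, h2eq⟩
          subst hmq
          -- need ¬ (pvVal p ≤ pvVal m): from h2 at p
          rcases h2 p (List.mem_cons_self ..) with h' | ⟨h', h''⟩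
          · simp [not_le.mpr h']
          · -- pvVal m = pvVal p ∧ m.1 ≤ p.1, but hp: ties in t have p.1 < r.1
            exfalso
            have := hp m h1' h'.symm
            omega
theorem pvRefMin_congr (l₁ l₂ : List (Int × Int))
    (hpw₁ : l₁.Pairwise (fun p q => pvVal p = pvVal q → p.1 < q.1))
    (hpw₂ : l₂.Pairwise (fun p q => pvVal p = pvVal q → p.1 < q.1))
    (hmem : ∀ p, p ∈ l₁ ↔ p ∈ l₂) : pvRefMin l₁ = pvRefMin l₂ := by
  cases h : pvRefMin l₁ with
  | none =>
    have h1 : l₁ = [] := (pvRefMin_eq_none_iff l₁).mp h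
    subst h1
    rcases h2 : pvRefMin l₂ with _ | m
    · rfl
    · exfalso
      have hm := ((pvRefMin_eq_some_iff l₂ m hpw₂).mp h2).1
      exact (List.not_mem_nil (a := m)).elim (by simpa using (hmem m).mpr hm)
  | some m =>
    have hm := (pvRefMin_eq_some_iff l₁ m hpw₁).mp h
    exact ((pvRefMin_eq_some_iff l₂ m hpw₂).mpr
      ⟨(hmem m).mp hm.1, fun p hp => hm.2 p ((hmem p).mpr hp)⟩).symm
def pvCP (cs : List Char) (i j : Nat) : Prop :=
  i < j ∧ j < cs.length ∧ cs.getD i 'a' = cs.getD j 'a' ∧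
    ∀ k, i < k → k < j → cs.getD k 'a' ≠ cs.getD i 'a'
def pvFI (cs : List Char) (ic : Int × Char) : Option (Int × Int) :=
  let j := PySem.Chars.findFrom cs [ic.2] (ic.1 + 1) none
  if j = -1 then none else some (ic.1, j)
def pvPairsI (cs : List Char) : List (Int × Int) :=
  (PySem.List.enumerate cs 0).filterMap (pvFI cs)
def pvFJ (cs : List Char) (jc : Int × Char) : Option (Int × Int) :=
  match pvLastIdx? (cs.take jc.1.toNat) jc.2 with
  | some i => some ((i : Int), jc.1)
  | none => none
def pvPairsJ (cs : List Char) : List (Int × Int) :=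
  (PySem.List.enumerate cs 0).filterMap (pvFJ cs)

theorem pvPairsI_pairwise (cs : List Char) :
    (pvPairsI cs).Pairwise (fun p q => pvVal p = pvVal q → p.1 < q.1) := by
  have h1 : (PySem.List.enumerate cs 0).Pairwise (fun p q => p.1 < q.1) :=
    PySem.List.pairwise_lt_enumerate cs 0
  have h2 := (List.pairwise_filterMap (f := pvFI cs)
    (R := fun (p q : Int × Int) => p.1 < q.1)).mpr
    (h1.imp ?imp)
  case imp =>
    intro a b hab
    intro x hx y hy
    simp only [pvFI] at hx hy
    split_ifs at hx hy with h h'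
    · obtain rfl := Option.some_injective _ hx
      obtain rfl := Option.some_injective _ hy
      exact hab
  refine h2.imp ?_
  intro p q h _
  exact h

theorem pvPairsJ_pairwise (cs : List Char) :
    (pvPairsJ cs).Pairwise (fun p q => pvVal p = pvVal q → p.1 < q.1) := by
  have h1 : (PySem.List.enumerate cs 0).Pairwise (fun p q => p.1 < q.1) :=
    PySem.List.pairwise_lt_enumerate cs 0
  have h2 := (List.pairwise_filterMap (f := pvFJ cs)
    (R := fun (p q : Int × Int) => p.2 < q.2)).mpr
    (h1.imp ?imp)
  case imp =>
    intro a b hab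
    intro x hx y hy
    simp only [pvFJ] at hx hy
    split at hx
    case h_2 => exact absurd hx (by simp)
    split at hy
    case h_2 => exact absurd hy (by simp)
    obtain rfl := Option.some_injective _ hx
    obtain rfl := Option.some_injective _ hy
    exact hab
  refine h2.imp ?_
  intro p q h hv
  unfold pvVal at hv
  omega
theorem pvSingletonPrefix (c : Char) (l : List Char) : [c] <+: l ↔ l.head? = some c := by
  cases l with
  | nil => simp
  | cons a t => simp [List.cons_prefix_cons, eq_comm]

theorem mem_pvPairsI (cs : List Char) (p : Int × Int) :
    p ∈ pvPairsI cs ↔ ∃ i j : Nat, p = ((i : Int), (j : Int)) ∧ pvCP cs i j := by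
  unfold pvPairsI
  rw [List.mem_filterMap]
  constructor
  · rintro ⟨a, ha, hfa⟩
    rw [PySem.List.mem_enumerate_iff] at ha
    obtain ⟨k, hk, rfl⟩ := ha
    simp only [pvFI] at hfa
    split_ifs at hfa with hne
    have hj := PySem.Chars.findFrom_natCast_spec cs [cs[k]] (k + 1) (by omega) (by
      push_cast
      simpa using hne)
    set j := PySem.Chars.findFrom cs [cs[k]] ((0 : Int) + k + 1) with hjdef
    have hcast : ((0 : Int) + k + 1) = ((k + 1 : Nat) : Int) := by push_cast; ring
    rw [hcast] at hjdef
    obtain ⟨hle, hpre, hmin⟩ := hj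
    rw [← hjdef] at hle hpre hmin
    rw [pvSingletonPrefix, List.head?_drop] at hpre
    have hjnn : 0 ≤ j := by omega
    have hjlt : j.toNat < cs.length := by
      rcases List.getElem?_eq_some_iff.mp hpre with ⟨hh, _⟩
      exact hh
    have hjval : cs[j.toNat]'hjlt = cs[k] := by
      rcases List.getElem?_eq_some_iff.mp hpre with ⟨_, hv⟩
      exact hv
    refine ⟨k, j.toNat, ?_, ?_⟩
    · simp at hfa
      rw [← hfa]
      simp only [Prod.mk.injEq]
      exact ⟨trivial, by omega⟩
    · refine ⟨by omega, hjlt, ?_, ?_⟩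
      · rw [List.getD_eq_getElem cs 'a' hk, List.getD_eq_getElem cs 'a' hjlt, hjval]
      · intro m h1 h2
        have hmlt : m < cs.length := by omega
        have := hmin m (by omega) (by omega)
        rw [pvSingletonPrefix, List.head?_drop] at this
        rw [List.getD_eq_getElem cs 'a' hmlt, List.getD_eq_getElem cs 'a' hk]
        intro heq
        exact this (by rw [List.getElem?_eq_some_iff]; exact ⟨hmlt, heq⟩)
  · rintro ⟨i, j, rfl, hlt, hjlt, heq, hbet⟩
    refine ⟨((i : Int), cs[i]'(by omega)), ?_, ?_⟩
    · rw [PySem.List.mem_enumerate_iff]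
      exact ⟨i, by omega, by simp⟩
    · simp only [pvFI]
      have hcast : ((i : Int) + 1) = ((i + 1 : Nat) : Int) := by push_cast; ring
      have hlen : i + 1 ≤ cs.length := by omega
      have hcj : cs.getD j 'a' = cs.getD i 'a' := heq.symm
      rw [List.getD_eq_getElem cs 'a' hjlt, List.getD_eq_getElem cs 'a' (by omega : i < cs.length)] at hcj
      have hmem : cs[i]'(by omega) ∈ cs.drop (i + 1) := by
        have : (cs.drop (i + 1))[j - (i + 1)]'(by simp; omega) = cs[j]'hjlt := by
          rw [List.getElem_drop]
          congr 1
          omega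
        rw [← hcj, ← this]
        exact List.getElem_mem _
      have hne : PySem.Chars.findFrom cs [cs[i]'(by omega)] ((i : Int) + 1) none ≠ -1 := by
        rw [hcast]
        intro hcontra
        rw [PySem.Chars.findFrom_natCast_eq_neg_one_iff cs _ (i + 1) hlen] at hcontra
        exact hcontra ((List.singleton_infix_iff _ _).mpr hmem)
      rw [if_neg hne]
      set r := PySem.Chars.findFrom cs [cs[i]'(by omega)] ((i : Int) + 1) none with hrdef
      obtain ⟨hle, hpre, hmin⟩ := by
        rw [hcast] at hrdef
        exact hrdef ▸ PySem.Chars.findFrom_natCast_spec cs [cs[i]'(by omega)] (i + 1) hlen (by rw [← hcast]; exact hne)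
      have hrj : r.toNat = j := by
        rw [pvSingletonPrefix, List.head?_drop] at hpre
        rcases List.getElem?_eq_some_iff.mp hpre with ⟨hrlt, hrval⟩
        by_contra hneq
        rcases Nat.lt_or_ge r.toNat j with hlt' | hge
        · -- r.toNat strictly between i and j: contradicts hbet
          have : i < r.toNat := by omega
          apply hbet r.toNat this hlt'
          rw [List.getD_eq_getElem cs 'a' hrlt, List.getD_eq_getElem cs 'a' (by omega : i < cs.length)]
          exact hrval
        · -- j < r.toNat: contradicts minimality at j
          have hj' : j < r.toNat := by omega
          have := hmin j (by omega) hj'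
          rw [pvSingletonPrefix, List.head?_drop] at this
          exact this (by rw [List.getElem?_eq_some_iff]; exact ⟨hjlt, hcj⟩)
      simp only [Option.some.injEq, Prod.mk.injEq]
      exact ⟨trivial, by omega⟩
theorem mem_pvPairsJ (cs : List Char) (p : Int × Int) :
    p ∈ pvPairsJ cs ↔ ∃ i j : Nat, p = ((i : Int), (j : Int)) ∧ pvCP cs i j := by
  unfold pvPairsJ
  rw [List.mem_filterMap]
  have htake : ∀ (j k : Nat), k < j → j ≤ cs.length → (cs.take j).getD k 'a' = cs.getD k 'a' := by
    intro j k hkj hj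
    have hk : k < (cs.take j).length := by simp; omega
    rw [List.getD_eq_getElem _ 'a' hk, List.getD_eq_getElem _ 'a' (by simp at hk; omega : k < cs.length)]
    exact List.getElem_take
  constructor
  · rintro ⟨a, ha, hfa⟩
    rw [PySem.List.mem_enumerate_iff] at ha
    obtain ⟨j, hj, rfl⟩ := ha
    simp only [pvFJ] at hfa
    split at hfa
    case h_2 => exact absurd hfa (by simp)
    case h_1 i hpl =>
    obtain rfl := Option.some_injective _ hfa
    have htn : ((0 : Int) + (j : Int)).toNat = j := by omega
    rw [htn] at hpl
    rw [pvLastIdx?_eq_some_iff] at hpl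
    have hi := hpl
    obtain ⟨h1, h2, h3⟩ := hi
    have hlen : (cs.take j).length = j := by simp; omega
    rw [hlen] at h1 h3
    refine ⟨i, j, by simp only [Prod.mk.injEq]; exact ⟨trivial, by omega⟩, ?_⟩
    refine ⟨h1, hj, ?_, ?_⟩
    · rw [← htake j i h1 (by omega)]
      rw [h2, List.getD_eq_getElem cs 'a' hj]
    · intro k hk1 hk2
      have hthis := h3 k hk1 hk2
      rw [htake j k hk2 (by omega)] at hthis
      have hieq : cs.getD i 'a' = cs[j]'hj := by
        rw [← htake j i h1 (by omega)]
        exact h2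
      intro hc
      exact hthis (hc.trans hieq)
  · rintro ⟨i, j, rfl, hlt, hjlt, heq, hbet⟩
    refine ⟨((j : Int), cs[j]'hjlt), ?_, ?_⟩
    · rw [PySem.List.mem_enumerate_iff]
      exact ⟨j, hjlt, by simp⟩
    · simp only [pvFJ]
      have hgoal : pvLastIdx? (cs.take (((j : Int)).toNat)) cs[j] = some i := by
        have htn' : ((j : Int)).toNat = j := by omega
        rw [htn', pvLastIdx?_eq_some_iff]
        have hlen : (cs.take j).length = j := by simp; omega
        rw [hlen]
        refine ⟨hlt, ?_, ?_⟩
        · rw [htake j i hlt (by omega), ← List.getD_eq_getElem cs 'a' hjlt]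
          exact heq
        · intro k hk1 hk2
          rw [htake j k hk2 (by omega)]
          have := hbet k hk1 hk2
          rw [heq] at this
          rw [← List.getD_eq_getElem cs 'a' hjlt]
          exact this
      rw [hgoal]
def pvGap (cs : List Char) (p : Int × Int) : List Char :=
  PySem.Chars.slice cs (some (p.1 + 1)) (some p.2)

theorem pvGap_length (cs : List Char) (i j : Nat) (hij : i < j) (hj : j ≤ cs.length) :
    ((pvGap cs ((i : Int), (j : Int))).length : Int) = pvVal ((i : Int), (j : Int)) := by
  unfold pvGap pvVal
  have h1 : ((i : Int) + 1) = ((i + 1 : Nat) : Int) := by push_cast; ring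
  rw [h1]
  show ((PySem.List.slice cs (some ((i + 1 : Nat) : Int)) (some ((j : Nat) : Int))).length : Int) = _
  rw [PySem.List.slice_natCast]
  simp
  omega

theorem pvSimA (cs : List Char) (l : List (Int × Char))
    (hl : ∀ x ∈ l, 0 ≤ x.1 ∧ x.1 < (cs.length : Int))
    (b : Option (Int × Int))
    (hb : ∀ p ∈ b, ∃ i j : Nat, p = ((i : Int), (j : Int)) ∧ i < j ∧ j ≤ cs.length) :
    l.foldl (fun min_gap ic =>
      let j := PySem.Chars.findFrom cs [ic.2] (ic.1 + 1) none
      if j ≠ -1 then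
        let gap := PySem.Chars.slice cs (some (ic.1 + 1)) (some j)
        match min_gap with
        | none => some gap
        | some g => if gap.length < g.length then some gap else min_gap
      else min_gap) (b.map (pvGap cs))
    = (l.foldl (fun b ic => match pvFI cs ic with
        | some p => pvChamp b p
        | none => b) b).map (pvGap cs) := by
  induction l generalizing b with
  | nil => simp
  | cons ic t iht =>
    obtain ⟨hic1, hic2⟩ := hl ic (List.mem_cons_self ..)
    have hl' : ∀ x ∈ t, 0 ≤ x.1 ∧ x.1 < (cs.length : Int) :=
      fun x hx => hl x (List.mem_cons_of_mem _ hx)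
    simp only [List.foldl_cons]
    by_cases hj : PySem.Chars.findFrom cs [ic.2] (ic.1 + 1) none = -1
    · rw [show (if PySem.Chars.findFrom cs [ic.2] (ic.1 + 1) none ≠ -1 then
          (match b.map (pvGap cs) with
            | none => some (PySem.Chars.slice cs (some (ic.1 + 1)) (some (PySem.Chars.findFrom cs [ic.2] (ic.1 + 1) none)))
            | some g => if (PySem.Chars.slice cs (some (ic.1 + 1)) (some (PySem.Chars.findFrom cs [ic.2] (ic.1 + 1) none))).length < g.length
                then some (PySem.Chars.slice cs (some (ic.1 + 1)) (some (PySem.Chars.findFrom cs [ic.2] (ic.1 + 1) none)))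
                else b.map (pvGap cs))
          else b.map (pvGap cs)) = b.map (pvGap cs) by simp [hj]]
      rw [show (match pvFI cs ic with
          | some p => pvChamp b p
          | none => b) = b by simp [pvFI, hj]]
      exact iht hl' b hb
    · have hcast : ic.1 + 1 = ((ic.1.toNat + 1 : Nat) : Int) := by omega
      have hle : ic.1.toNat + 1 ≤ cs.length := by omega
      have hspec := PySem.Chars.findFrom_natCast_spec cs [ic.2] (ic.1.toNat + 1) hle
        (by rw [← hcast]; exact hj)
      rw [← hcast] at hspec
      obtain ⟨hge, hpre, hmin⟩ := hspec
      set j := PySem.Chars.findFrom cs [ic.2] (ic.1 + 1) none with hjd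
      rw [pvSingletonPrefix, List.head?_drop] at hpre
      have hjlt : j.toNat < cs.length := (List.getElem?_eq_some_iff.mp hpre).1
      have hvalid : (ic.1, j) = ((ic.1.toNat : Int), (j.toNat : Int)) ∧ ic.1.toNat < j.toNat ∧ j.toNat ≤ cs.length := by
        refine ⟨by simp only [Prod.mk.injEq]; constructor <;> omega, by omega, by omega⟩
      have hstep2 : (match pvFI cs ic with
          | some p => pvChamp b p
          | none => b) = pvChamp b (ic.1, j) := by
        simp [pvFI, ← hjd, hj]
      rw [hstep2]
      cases b with
      | none =>
        rw [show (if j ≠ -1 then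
            (match (none : Option (Int × Int)).map (pvGap cs) with
              | none => some (PySem.Chars.slice cs (some (ic.1 + 1)) (some j))
              | some g => if (PySem.Chars.slice cs (some (ic.1 + 1)) (some j)).length < g.length
                  then some (PySem.Chars.slice cs (some (ic.1 + 1)) (some j))
                  else (none : Option (Int × Int)).map (pvGap cs))
            else (none : Option (Int × Int)).map (pvGap cs))
            = (some (ic.1, j)).map (pvGap cs) by simp [hj, pvGap]]
        rw [show pvChamp none (ic.1, j) = some (ic.1, j) from rfl]
        apply iht hl'
        rintro p hp
        simp at hp
        subst hp
        exact ⟨ic.1.toNat, j.toNat, hvalid.1, hvalid.2.1, hvalid.2.2⟩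
      | some q =>
        obtain ⟨qi, qj, hq, hq1, hq2⟩ := hb q (by simp)
        have hlen1 : ((PySem.Chars.slice cs (some (ic.1 + 1)) (some j)).length : Int) = pvVal (ic.1, j) := by
          have := pvGap_length cs ic.1.toNat j.toNat hvalid.2.1 hvalid.2.2
          rw [← hvalid.1] at this
          exact this
        have hlen2 : (((pvGap cs q)).length : Int) = pvVal q := by
          have := pvGap_length cs qi qj hq1 hq2
          rw [← hq] at this
          exact this
        have hcond : ((PySem.Chars.slice cs (some (ic.1 + 1)) (some j)).length < (pvGap cs q).length)
            ↔ pvVal (ic.1, j) < pvVal q := by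
          rw [← hlen1, ← hlen2]
          exact_mod_cast Iff.rfl
        by_cases hv : pvVal (ic.1, j) < pvVal q
        · rw [show (if j ≠ -1 then
              (match (some q).map (pvGap cs) with
                | none => some (PySem.Chars.slice cs (some (ic.1 + 1)) (some j))
                | some g => if (PySem.Chars.slice cs (some (ic.1 + 1)) (some j)).length < g.length
                    then some (PySem.Chars.slice cs (some (ic.1 + 1)) (some j))
                    else (some q).map (pvGap cs))
              else (some q).map (pvGap cs))
              = (some (ic.1, j)).map (pvGap cs) by
                simp only [Option.map_some]
                rw [if_pos hj]
                rw [if_pos (hcond.mpr hv)]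
                simp [pvGap]]
          rw [show pvChamp (some q) (ic.1, j) = some (ic.1, j) by simp [pvChamp, hv]]
          apply iht hl'
          rintro p hp
          simp at hp
          subst hp
          exact ⟨ic.1.toNat, j.toNat, hvalid.1, hvalid.2.1, hvalid.2.2⟩
        · rw [show (if j ≠ -1 then
              (match (some q).map (pvGap cs) with
                | none => some (PySem.Chars.slice cs (some (ic.1 + 1)) (some j))
                | some g => if (PySem.Chars.slice cs (some (ic.1 + 1)) (some j)).length < g.length
                    then some (PySem.Chars.slice cs (some (ic.1 + 1)) (some j))
                    else (some q).map (pvGap cs))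
              else (some q).map (pvGap cs))
              = (some q).map (pvGap cs) by
                simp only [Option.map_some]
                rw [if_pos hj]
                rw [if_neg (fun hc => hv (hcond.mp hc))]]
          rw [show pvChamp (some q) (ic.1, j) = some q by simp [pvChamp, hv]]
          apply iht hl'
          rintro p hp
          simp at hp
          subst hp
          exact ⟨qi, qj, hq, hq1, hq2⟩
theorem pvSimB (cs : List Char) : ∀ (suf pre : List Char), cs = pre ++ suf →
    ∀ (d : PySem.Dict Char Int) (b : Option (Int × Int)),
    (∀ c, d.get? c = (pvLastIdx? pre c).map (fun i => (i : Int))) →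
    ((PySem.List.enumerate suf (pre.length : Int)).foldl (fun st jc =>
      let best :=
        match st.1.get? jc.2 with
        | some i =>
          match st.2 with
          | none => some (i, jc.1)
          | some b => if jc.1 - i - 1 < b.2 - b.1 - 1 then some (i, jc.1) else st.2
        | none => st.2
      (st.1.insert jc.2 jc.1, best)) (d, b)).2
    = (PySem.List.enumerate suf (pre.length : Int)).foldl (fun b jc =>
        match pvFJ cs jc with
        | some p => pvChamp b p
        | none => b) b := by
  intro suf
  induction suf with
  | nil => intro pre hcs d b hd; simp [PySem.List.enumerate_nil]
  | cons x suf iht =>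
    intro pre hcs d b hd
    rw [PySem.List.enumerate_cons]
    simp only [List.foldl_cons]
    have htake : cs.take ((pre.length : Int)).toNat = pre := by
      rw [hcs]
      have h1 : ((pre.length : Int)).toNat = pre.length := by omega
      rw [h1, List.take_left]
    have hd' : ∀ c, (d.insert x (pre.length : Int)).get? c
        = (pvLastIdx? (pre ++ [x]) c).map (fun i => (i : Int)) := by
      intro c
      rw [pvLastIdx?_append_singleton]
      by_cases hc : c = x
      · subst hc
        rw [PySem.Dict.get?_insert_self, if_pos rfl]
        simp
      · rw [PySem.Dict.get?_insert_of_ne _ _ hc, if_neg (fun h => hc h.symm)]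
        exact hd c
    have hcs' : cs = (pre ++ [x]) ++ suf := by rw [hcs, List.append_assoc]; rfl
    have hb' := iht (pre ++ [x]) hcs' (d.insert x (pre.length : Int))
    rw [show (((pre ++ [x]).length : Nat) : Int) = (pre.length : Int) + 1 by simp] at hb'
    cases hpl : pvLastIdx? pre x with
    | none =>
      have hget : d.get? x = none := by rw [hd x, hpl]; rfl
      simp only [hget, pvFJ, htake, hpl]
      exact hb' b hd'
    | some i =>
      have hget : d.get? x = some (i : Int) := by rw [hd x, hpl]; rfl
      simp only [hget, pvFJ, htake, hpl, pvChamp, pvVal]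
      cases b with
      | none =>
        simp only []
        exact hb' _ hd'
      | some q =>
        simp only []
        exact hb' _ hd'

-- the candidate-filtering loops, re-grouped as a fold over the filtered list
theorem pvFoldFilter (f : Int × Char → Option (Int × Int)) (l : List (Int × Char)) (b : Option (Int × Int)) :
    l.foldl (fun b ic => match f ic with
        | some p => pvChamp b p
        | none => b) b
    = (l.filterMap f).foldl pvChamp b := by
  induction l generalizing b with
  | nil => rfl
  | cons a t ih =>
    simp only [List.foldl_cons, List.filterMap_cons]
    cases h : f a with
    | none => simp only [h]; exact ih b
    | some p => simp only [h, List.foldl_cons]; exact ih (pvChamp b p)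

theorem smallest_gap_eq (s : String) :
    smallest_gap s
      = match pvRefMin (pvPairsI s.toList) with
        | none => ""
        | some p => String.ofList (pvGap s.toList p) := by
  unfold smallest_gap
  simp only []
  have hA := pvSimA s.toList (PySem.List.enumerate s.toList 0)
    (by
      intro x hx
      rw [PySem.List.mem_enumerate_iff] at hx
      obtain ⟨k, hk, rfl⟩ := hx
      refine ⟨by simp, ?_⟩
      have : ((0 + k : Int)) < (s.toList.length : Int) := by omega
      simpa using this)
    none (by simp)
  rw [show (Option.map (pvGap s.toList) none) = (none : Option (List Char)) from rfl] at hA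
  rw [hA]
  rw [pvFoldFilter (pvFI s.toList) (PySem.List.enumerate s.toList 0) none]
  rw [show (List.filterMap (pvFI s.toList) (PySem.List.enumerate s.toList 0)) = pvPairsI s.toList from rfl]
  rw [pvFold_champ]
  cases pvRefMin (pvPairsI s.toList) <;> rfl

theorem smallest_gap_alt_eq (s : String) :
    smallest_gap_alt s
      = match pvRefMin (pvPairsJ s.toList) with
        | none => ""
        | some p => String.ofList (pvGap s.toList p) := by
  unfold smallest_gap_alt
  simp only []
  rw [show (0 : Int) = ((([] : List Char).length : Nat) : Int) by simp]
  rw [pvSimB s.toList s.toList [] rfl PySem.Dict.empty none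
    (by intro c; rw [PySem.Dict.get?_empty]; rfl)]
  rw [pvFoldFilter (pvFJ s.toList) (PySem.List.enumerate s.toList ((([] : List Char).length : Nat) : Int)) none]
  rw [show (List.filterMap (pvFJ s.toList) (PySem.List.enumerate s.toList ((([] : List Char).length : Nat) : Int))) = pvPairsJ s.toList by simp [pvPairsJ]]
  rw [pvFold_champ]
  cases pvRefMin (pvPairsJ s.toList) <;> rfl

-- ===== VERDICT (by name: the statement is the Claim_ definition above) =====
theorem smallest_gap_spec : Claim_equal_smallest_gap := by
  intro s _
  unfold Spec_smallest_gap
  rw [smallest_gap_eq, smallest_gap_alt_eq,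
    pvRefMin_congr (pvPairsI s.toList) (pvPairsJ s.toList)
      (pvPairsI_pairwise _) (pvPairsJ_pairwise _)
      (fun p => (mem_pvPairsI _ p).trans (mem_pvPairsJ _ p).symm)]
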